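-- pv_equiv track=rewrite | github.com/veeceey/CodeSignalCodeVueHackerRank | Better_RobotBodyParts.py | solve
-- ===== SOURCE A (Python) =====
-- def solve(param1, param2):
--     hm={}
--     for p in param1:
--         roboInfo=p.split("_")
--         robotName=roboInfo[0]
--         robotPart=roboInfo[1]
--         if robotName not in hm and robotPart not in hm.values():
--             hm[robotName]={robotPart}
--         elif robotName in hm and robotPart not in hm.values():
--             hm[robotName].add(robotPart)
--     result=[]
--     for robotName, robotSet in hm.items():
--         flag = True
--         for i in range(len(param2)):
--             if param2[i] not in robotSet:
--                 flag=False
--                 break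
--         if flag==True:
--             result.append(robotName)
--     return result
-- ===== SOURCE B (Python) =====
-- def solve(param1, param2):
--     # Inverted index: part -> set of robot names having it; answer by intersecting posting lists.
--     postings = {}
--     names = []
--     seen = set()
--     for p in param1:
--         info = p.split("_")
--         name = info[0]
--         part = info[1]
--         if name not in seen:
--             seen.add(name)
--             names.append(name)
--         postings.setdefault(part, set()).add(name)
--     candidates = set(names)
--     for part in param2:
--         candidates &= postings.get(part, set())
--     return [n for n in names if n in candidates]
-- ===== Notes on version B (the rewrite author's own statement) =====
-- stated objective: alternative
-- what changed: B builds an inverted index part -> set of robot names plus an ordered list of first-appearance names, then answers by intersecting the query parts' posting lists, instead of A's dict of per-robot part sets scanned robot-by-robot against the query.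
-- outside the precondition, e.g. on solve(['nounderscore'], []): A raises IndexError, B raises IndexError
import Mathlib
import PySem

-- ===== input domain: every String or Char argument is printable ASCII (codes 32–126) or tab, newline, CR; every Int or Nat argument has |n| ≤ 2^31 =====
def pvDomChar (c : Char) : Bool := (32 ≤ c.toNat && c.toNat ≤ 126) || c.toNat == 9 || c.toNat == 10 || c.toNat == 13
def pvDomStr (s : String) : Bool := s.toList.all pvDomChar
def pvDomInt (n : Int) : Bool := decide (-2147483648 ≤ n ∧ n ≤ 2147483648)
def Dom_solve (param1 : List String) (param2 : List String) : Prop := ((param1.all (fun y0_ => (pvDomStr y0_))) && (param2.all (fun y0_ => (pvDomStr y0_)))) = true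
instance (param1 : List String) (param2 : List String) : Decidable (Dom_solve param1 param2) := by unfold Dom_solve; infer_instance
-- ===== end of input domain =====

-- B replaces A's per-robot scan of the query with an inverted index part → set of robot names,
-- intersecting posting lists over the query (objective: alternative decomposition, similar cost).

-- ===== PORT A =====
-- Python's '==' between a str and a set value is always False, so 'robotPart not in hm.values()'
-- (hm.values() holds sets) is always True; ported literally as a constant-false comparison.
def pvStrEqSet (_s : String) (_t : PySem.Set String) : Bool := false

-- the inner 'for i in range(len(param2)): if param2[i] not in robotSet: flag=False; break'
def pvFlagLoop (param2 : List String) (robotSet : PySem.Set String) : List Int → Bool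
  | [] => true
  | i :: rest =>
    match PySem.List.pyGet? param2 i with
    | some x => if robotSet.contains x = false then false else pvFlagLoop param2 robotSet rest
    | none => true  -- unreachable: i comes from range(len(param2))

def pvStepA (hm : PySem.Dict String (PySem.Set String)) (p : String) :
    PySem.Dict String (PySem.Set String) :=
  let roboInfo := (PySem.Str.split? p "_").getD []   -- sep "_" ≠ "", so split? is always some
  match PySem.List.pyGet? roboInfo 0, PySem.List.pyGet? roboInfo 1 with
  | some robotName, some robotPart =>
    if !hm.contains robotName && !(hm.values.any (pvStrEqSet robotPart)) then
      hm.insert robotName (PySem.Set.ofList [robotPart])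
    else if hm.contains robotName && !(hm.values.any (pvStrEqSet robotPart)) then
      hm.modify robotName PySem.Set.empty (fun s => s.add robotPart)
    else hm
  | _, _ => hm  -- Python raises IndexError here; excluded by Pre_solve

def solve (param1 : List String) (param2 : List String) : List String :=
  let hm := param1.foldl pvStepA PySem.Dict.empty
  hm.items.foldl (fun result kv =>
    if pvFlagLoop param2 kv.2 (PySem.List.pyRange 0 (param2.length : Int)) = true
    then result ++ [kv.1] else result) []

-- ===== PORT B =====
def pvStepB (st : PySem.Dict String (PySem.Set String) × List String × PySem.Set String)
    (p : String) : PySem.Dict String (PySem.Set String) × List String × PySem.Set String :=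
  let info := (PySem.Str.split? p "_").getD []
  match PySem.List.pyGet? info 0, PySem.List.pyGet? info 1 with
  | some name, some part =>
    let ns := if st.2.2.contains name = false then (st.2.1 ++ [name], st.2.2.add name)
              else (st.2.1, st.2.2)
    (st.1.modify part PySem.Set.empty (fun s => s.add name), ns.1, ns.2)
  | _, _ => st

def solve_alt (param1 : List String) (param2 : List String) : List String :=
  let st := param1.foldl pvStepB (PySem.Dict.empty, [], PySem.Set.empty)
  let candidates :=
    param2.foldl (fun c part => PySem.Set.inter c (st.1.getD part PySem.Set.empty))
      (PySem.Set.ofList st.2.1)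
  st.2.1.filter (fun n => candidates.contains n)

-- ===== PRECONDITION & SPEC =====
-- Pre_ excludes inputs where some string of param1 has no '_' : there A raises IndexError on roboInfo[1].
def Pre_solve (param1 : List String) (param2 : List String) : Prop :=
  ∀ p ∈ param1, 2 ≤ ((PySem.Str.split? p "_").getD []).length
instance (param1 : List String) (param2 : List String) : Decidable (Pre_solve param1 param2) := by
  unfold Pre_solve; infer_instance
def pvWitness_solve : List String × List String := (["rob_arm", "tom_leg", "rob_leg"], ["leg"])

def Spec_solve (param1 : List String) (param2 : List String) (out : List String) : Prop := out = solve_alt param1 param2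
instance (param1 : List String) (param2 : List String) (out : List String) : Decidable (Spec_solve param1 param2 out) := by unfold Spec_solve; infer_instance

-- ===== CLAIM (what is proved, stated in full; the proofs are below) =====
def Claim_equal_solve : Prop := ∀ (param1 : List String) (param2 : List String), Dom_solve param1 param2 → Pre_solve param1 param2 → Spec_solve param1 param2 (solve param1 param2)

-- ===== LEMMAS AND PROOFS =====

-- small dictionary facts (specific combinations not in the lemma book)
lemma pv_get?_of_not_contains {κ ν : Type} [BEq κ] (d : PySem.Dict κ ν) (k : κ)
    (h : d.contains k = false) : d.get? k = none := by
  simp only [PySem.Dict.contains, List.any_eq_false] at h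
  simp [PySem.Dict.get?, List.find?_eq_none.mpr h]

lemma pv_keys_insert_of_not_contains {κ ν : Type} [BEq κ] (d : PySem.Dict κ ν) (k : κ) (v : ν)
    (h : d.contains k = false) : (d.insert k v).keys = d.keys ++ [k] := by
  simp [PySem.Dict.insert, h, PySem.Dict.keys]

lemma pv_keys_insert_of_contains {κ ν : Type} [BEq κ] [LawfulBEq κ] (d : PySem.Dict κ ν)
    (k : κ) (v : ν) (h : d.contains k = true) : (d.insert k v).keys = d.keys := by
  simp only [PySem.Dict.insert, h, if_pos, PySem.Dict.keys, List.map_map]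
  apply List.map_congr_left
  intro p hp
  simp only [Function.comp_apply]
  split_ifs with h1
  · exact (eq_of_beq h1).symm
  · rfl

-- the always-false membership test 'robotPart in hm.values()' (str == set is False)
lemma pv_any_strEqSet (l : List (PySem.Set String)) (x : String) :
    l.any (pvStrEqSet x) = false := by
  simp [List.any_eq_false, pvStrEqSet]

-- the inner flag loop over range(len(param2)) is an 'all parts present' test
lemma pvFlagLoop_eq_all (param2 : List String) (s : PySem.Set String) :
    ∀ (n k : Nat), param2.length - k = n →
      pvFlagLoop param2 s (PySem.List.pyRange (k : Int) (param2.length : Int)) =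
        (param2.drop k).all (fun x => PySem.Set.contains s x) := by
  intro n
  induction n with
  | zero =>
    intro k hk
    have hle : param2.length ≤ k := by omega
    have h1 : ¬ ((k : Int) < (param2.length : Int)) := by exact_mod_cast not_lt.mpr hle
    rw [List.drop_eq_nil_of_le hle]
    simp [PySem.List.pyRange, h1, pvFlagLoop]
  | succ m ih =>
    intro k hk
    have hlt : k < param2.length := by omega
    have hlt' : (k : Int) < (param2.length : Int) := by exact_mod_cast hlt
    rw [PySem.List.pyRange_one_cons hlt']
    have hcast : (k : Int) + 1 = ((k + 1 : Nat) : Int) := by push_cast; ring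
    have hg : PySem.List.pyGet? param2 (k : Int) = some param2[k] := by
      rw [PySem.List.pyGet?_natCast, List.getElem?_eq_getElem hlt]
    simp only [pvFlagLoop, hg]
    rw [hcast, ih (k + 1) (by omega), List.drop_eq_getElem_cons hlt]
    simp only [List.all_cons]
    rcases hC : PySem.Set.contains s param2[k] with _ | _ <;> simp_all

-- membership in the intersected candidate set
lemma pv_mem_foldl_inter (g : String → PySem.Set String) (l : List String) :
    ∀ (c : PySem.Set String) (x : String),
      x ∈ l.foldl (fun c part => PySem.Set.inter c (g part)) c ↔
        x ∈ c ∧ ∀ part ∈ l, x ∈ g part := by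
  induction l with
  | nil => simp
  | cons y ys ih =>
    intro c x
    rw [List.foldl_cons, ih, PySem.Set.mem_inter]
    constructor
    · rintro ⟨⟨h1, h2⟩, h3⟩
      exact ⟨h1, by intro part hp; rcases List.mem_cons.mp hp with rfl | hp; exact h2; exact h3 part hp⟩
    · rintro ⟨h1, h2⟩
      exact ⟨⟨h1, h2 y (List.mem_cons_self)⟩, fun part hp => h2 part (List.mem_cons_of_mem _ hp)⟩

-- the invariant tying A's dict to B's (postings, names, seen) state
def pvInv (hm : PySem.Dict String (PySem.Set String))
    (st : PySem.Dict String (PySem.Set String) × List String × PySem.Set String) : Prop :=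
  st.2.2 = st.2.1 ∧ st.2.1 = hm.keys ∧ hm.keys.Nodup ∧
  ∀ nm pt : String, (pt ∈ hm.getD nm PySem.Set.empty ↔ nm ∈ st.1.getD pt PySem.Set.empty)

lemma pvStep_inv (hm : PySem.Dict String (PySem.Set String))
    (st : PySem.Dict String (PySem.Set String) × List String × PySem.Set String) (p : String)
    (hp : 2 ≤ ((PySem.Str.split? p "_").getD []).length)
    (h : pvInv hm st) : pvInv (pvStepA hm p) (pvStepB st p) := by
  obtain ⟨hseen, hnames, hnd, hmem⟩ := h
  rcases hI : (PySem.Str.split? p "_").getD [] with _ | ⟨a, _ | ⟨b, t⟩⟩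
  · rw [hI] at hp; simp at hp
  · rw [hI] at hp; simp at hp
  have e0 : PySem.List.pyGet? ((PySem.Str.split? p "_").getD []) 0 = some a := by
    have := PySem.List.pyGet?_natCast ((PySem.Str.split? p "_").getD []) 0
    rw [hI] at this ⊢; simpa using this
  have e1 : PySem.List.pyGet? ((PySem.Str.split? p "_").getD []) 1 = some b := by
    have := PySem.List.pyGet?_natCast ((PySem.Str.split? p "_").getD []) 1
    rw [hI] at this ⊢; simpa using this
  simp only [pvStepA, pvStepB, e0, e1, pv_any_strEqSet, Bool.not_false, Bool.and_true,
    PySem.Dict.modify]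
  by_cases hc : hm.contains a = true
  · -- robot already known: A updates hm[a]; B leaves names/seen, posts a under b
    have hseenc : st.2.2.contains a = true := by
      rw [hseen, hnames]
      exact List.contains_iff_mem.mpr (((PySem.Dict.contains_iff_mem_keys) hm a).mp hc)
    rw [if_neg (show ¬(!hm.contains a) = true by simp [hc]),
        if_pos (show hm.contains a = true from hc),
        if_neg (show ¬ st.2.2.contains a = false by rw [hseenc]; simp)]
    refine ⟨hseen, ?_, ?_, ?_⟩
    · show st.2.1 = _
      rw [pv_keys_insert_of_contains hm a _ hc]; exact hnames
    · show (hm.insert a _).keys.Nodup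
      rw [pv_keys_insert_of_contains hm a _ hc]; exact hnd
    · intro nm pt
      show pt ∈ (hm.insert a _).getD nm _ ↔ nm ∈ (st.1.insert b _).getD pt _
      simp only [PySem.Dict.getD_insert]
      by_cases h1 : nm = a <;> by_cases h2 : pt = b
      · subst h1; subst h2
        rw [if_pos rfl, if_pos rfl]
        simp [PySem.Set.mem_add]
      · rw [if_pos h1, if_neg h2, PySem.Set.mem_add]
        subst h1
        constructor
        · rintro (h3 | rfl)
          · exact (hmem _ pt).mp h3
          · exact absurd rfl h2
        · intro h3; exact Or.inl ((hmem _ pt).mpr h3)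
      · rw [if_neg h1, if_pos h2, PySem.Set.mem_add]
        subst h2
        constructor
        · intro h3; exact Or.inl ((hmem nm _).mp h3)
        · rintro (h3 | rfl)
          · exact (hmem nm _).mpr h3
          · exact absurd rfl h1
      · rw [if_neg h1, if_neg h2]; exact hmem nm pt
  · -- new robot: A inserts a fresh key; B appends the name and posts it
    have hc' : hm.contains a = false := by simpa using hc
    have hamem : a ∉ hm.keys := fun hx => hc (((PySem.Dict.contains_iff_mem_keys) hm a).mpr hx)
    have hseenc : st.2.2.contains a = false := by
      rw [hseen, hnames]
      by_contra hx
      exact hamem (List.contains_iff_mem.mp (by simpa using hx))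
    rw [if_pos (show (!hm.contains a) = true by simp [hc']),
        if_pos (show st.2.2.contains a = false from hseenc)]
    have hadd : st.2.2.add a = st.2.2 ++ [a] := by
      simp only [PySem.Set.add]
      rw [if_neg (show ¬ st.2.2.contains a = true by rw [hseenc]; simp)]
    have hgone : hm.getD a PySem.Set.empty = PySem.Set.empty := by
      simp [PySem.Dict.getD, pv_get?_of_not_contains hm a hc']
    refine ⟨?_, ?_, ?_, ?_⟩
    · show st.2.2.add a = st.2.1 ++ [a]
      rw [hadd, hseen]
    · show st.2.1 ++ [a] = (hm.insert a _).keys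
      rw [pv_keys_insert_of_not_contains hm a _ hc', hnames]
    · show (hm.insert a _).keys.Nodup
      rw [pv_keys_insert_of_not_contains hm a _ hc']
      exact List.Nodup.append hnd (List.nodup_singleton a) (List.disjoint_singleton.mpr hamem)
    · intro nm pt
      show pt ∈ (hm.insert a _).getD nm _ ↔ nm ∈ (st.1.insert b _).getD pt _
      simp only [PySem.Dict.getD_insert]
      by_cases h1 : nm = a <;> by_cases h2 : pt = b
      · subst h1; subst h2
        rw [if_pos rfl, if_pos rfl]
        simp [PySem.Set.mem_ofList, PySem.Set.mem_add]
      · rw [if_pos h1, if_neg h2, PySem.Set.mem_ofList]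
        subst h1
        constructor
        · intro h3; simp at h3; exact absurd h3 h2
        · intro h3
          have h4 := (hmem _ pt).mpr h3
          rw [hgone] at h4
          simp [PySem.Set.empty] at h4
      · rw [if_neg h1, if_pos h2, PySem.Set.mem_add]
        subst h2
        constructor
        · intro h3; exact Or.inl ((hmem nm _).mp h3)
        · rintro (h3 | rfl)
          · exact (hmem nm _).mpr h3
          · exact absurd rfl h1
      · rw [if_neg h1, if_neg h2]; exact hmem nm pt

lemma pvInv_foldl (l : List String)
    (hpre : ∀ p ∈ l, 2 ≤ ((PySem.Str.split? p "_").getD []).length) :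
    pvInv (l.foldl pvStepA PySem.Dict.empty)
      (l.foldl pvStepB (PySem.Dict.empty, [], PySem.Set.empty)) := by
  induction l using List.reverseRecOn with
  | nil =>
    refine ⟨rfl, rfl, List.nodup_nil, ?_⟩
    intro nm pt
    simp [PySem.Dict.getD, PySem.Dict.get?_empty, PySem.Set.empty]
  | append_singleton l p ih =>
    rw [List.foldl_append, List.foldl_append]
    simp only [List.foldl_cons, List.foldl_nil]
    exact pvStep_inv _ _ p (hpre p (by simp))
      (ih (fun q hq => hpre q (List.mem_append_left _ hq)))

-- ===== VERDICT (by name: the statement is the Claim_ definition above) =====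
theorem solve_spec : Claim_equal_solve := by
  intro param1 param2 _hdom hpre
  unfold Spec_solve
  show solve param1 param2 = solve_alt param1 param2
  obtain ⟨hseen, hnames, hnd, hmem⟩ := pvInv_foldl param1 hpre
  simp only [solve, solve_alt]
  simp only [PySem.List.foldl_append_if
        (fun kv : String × PySem.Set String => pvFlagLoop param2 kv.2 (PySem.List.pyRange 0 (param2.length : Int)))
        (fun kv : String × PySem.Set String => kv.1)]
  rw [PySem.Dict.items_eq_map_keys _ hnd PySem.Set.empty]
  rw [List.filter_map, List.map_map, ← hnames]
  simp only [List.nil_append]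
  rw [show ((fun kv : String × PySem.Set String => kv.1) ∘ fun k =>
        (k, (List.foldl pvStepA PySem.Dict.empty param1).getD k PySem.Set.empty)) = id from rfl,
      List.map_id]
  apply List.filter_congr
  intro k hk
  simp only [Function.comp_apply]
  have hall := pvFlagLoop_eq_all param2
    ((param1.foldl pvStepA PySem.Dict.empty).getD k PySem.Set.empty) param2.length 0 (by omega)
  simp only [Nat.cast_zero, List.drop_zero] at hall
  rw [hall, Bool.eq_iff_iff]
  simp only [List.all_eq_true, PySem.Set.contains, List.contains_iff_mem]
  rw [pv_mem_foldl_inter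
        (fun part => (param1.foldl pvStepB (PySem.Dict.empty, [], PySem.Set.empty)).1.getD part PySem.Set.empty)]
  constructor
  · intro h
    exact ⟨(PySem.Set.mem_ofList _ _).mpr hk, fun part hp => (hmem k part).mp (h part hp)⟩
  · rintro ⟨-, h⟩ part hp
    exact (hmem k part).mpr (h part hp)
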